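-- pv_equiv track=rewrite | github.com/CMikhi/AeroStream | utils/pretty_print.py | apply_ocean_effect
-- ===== SOURCE A (Python) =====
-- class Colors:
--     """ANSI color codes for terminal output"""
--     # Standard colors
--     BLACK = '\033[30m'
--     RED = '\033[31m'
--     GREEN = '\033[32m'
--     YELLOW = '\033[33m'
--     BLUE = '\033[34m'
--     MAGENTA = '\033[35m'
--     CYAN = '\033[36m'
--     WHITE = '\033[37m'
--
--     # Bright colors
--     BRIGHT_BLACK = '\033[90m'
--     BRIGHT_RED = '\033[91m'
--     BRIGHT_GREEN = '\033[92m'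
--     BRIGHT_YELLOW = '\033[93m'
--     BRIGHT_BLUE = '\033[94m'
--     BRIGHT_MAGENTA = '\033[95m'
--     BRIGHT_CYAN = '\033[96m'
--     BRIGHT_WHITE = '\033[97m'
--
--     # Background colors
--     BG_BLACK = '\033[40m'
--     BG_RED = '\033[41m'
--     BG_GREEN = '\033[42m'
--     BG_YELLOW = '\033[43m'
--     BG_BLUE = '\033[44m'
--     BG_MAGENTA = '\033[45m'
--     BG_CYAN = '\033[46m'
--     BG_WHITE = '\033[47m'
--
--     # Styles
--     BOLD = '\033[1m'
--     DIM = '\033[2m'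
--     UNDERLINE = '\033[4m'
--     BLINK = '\033[5m'
--     REVERSE = '\033[7m'
--
--     # Reset
--     RESET = '\033[0m'
--
-- def apply_ocean_effect(text: str, line_num: int) -> str:
--     """Apply ocean color effect (blue to cyan gradient)"""
--     ocean_colors = [Colors.BLUE, Colors.BRIGHT_BLUE, Colors.CYAN, Colors.BRIGHT_CYAN]
--     color = ocean_colors[line_num % len(ocean_colors)]
--
--     colored_text = ""
--     for char in text:
--         if char != ' ':
--             colored_text += color + char
--         else:
--             colored_text += char
--
--     return colored_text + Colors.RESET
-- ===== SOURCE B (Python) =====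
-- class Colors:
--     BLUE = '\033[34m'
--     BRIGHT_BLUE = '\033[94m'
--     CYAN = '\033[36m'
--     BRIGHT_CYAN = '\033[96m'
--     RESET = '\033[0m'
--
-- def apply_ocean_effect(text: str, line_num: int) -> str:
--     """Apply ocean color effect (blue to cyan gradient)"""
--     ocean_colors = [Colors.BLUE, Colors.BRIGHT_BLUE, Colors.CYAN, Colors.BRIGHT_CYAN]
--     color = ocean_colors[line_num % len(ocean_colors)]
--     # Split on spaces (split(' ') keeps empty chunks, so joining with ' '
--     # reconstructs every space), prefix the color to each char of each chunk.
--     words = text.split(' ')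
--     return ' '.join(''.join(color + c for c in w) for w in words) + Colors.RESET
-- ===== Notes on version B (the rewrite author's own statement) =====
-- stated objective: alternative
-- what changed: Instead of one character loop with a growing accumulator string, B splits the text on spaces, colors each chunk by joining the color code before each of its characters, and rejoins the chunks with spaces.
import Mathlib
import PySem

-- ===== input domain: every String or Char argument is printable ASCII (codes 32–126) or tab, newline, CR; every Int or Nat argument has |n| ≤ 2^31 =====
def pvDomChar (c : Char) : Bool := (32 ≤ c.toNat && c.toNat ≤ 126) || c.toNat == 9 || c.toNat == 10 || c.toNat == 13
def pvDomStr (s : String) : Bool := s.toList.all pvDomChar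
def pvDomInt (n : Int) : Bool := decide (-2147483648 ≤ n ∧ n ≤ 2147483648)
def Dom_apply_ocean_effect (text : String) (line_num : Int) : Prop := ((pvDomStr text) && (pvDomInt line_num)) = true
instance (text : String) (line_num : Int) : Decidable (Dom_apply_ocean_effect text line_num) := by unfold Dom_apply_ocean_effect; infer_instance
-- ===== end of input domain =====

-- B replaces A's single character loop with a growing accumulator by a
-- split-on-space / color-each-chunk / rejoin-with-space pipeline (same output).

-- ===== PORT A =====
-- ANSI codes as char lists; '\x1b' is Char 27.
def pvBlue : List Char := ['\x1b', '[', '3', '4', 'm']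
def pvBrightBlue : List Char := ['\x1b', '[', '9', '4', 'm']
def pvCyan : List Char := ['\x1b', '[', '3', '6', 'm']
def pvBrightCyan : List Char := ['\x1b', '[', '9', '6', 'm']
def pvReset : List Char := ['\x1b', '[', '0', 'm']

-- ocean_colors[line_num % 4] (Python %, always in 0..3, so the lookup never raises)
def pvOceanColor (line_num : Int) : List Char :=
  match PySem.Int.mod line_num 4 with
  | 0 => pvBlue
  | 1 => pvBrightBlue
  | 2 => pvCyan
  | _ => pvBrightCyan

def apply_ocean_effect (text : String) (line_num : Int) : String :=
  let color := pvOceanColor line_num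
  let colored_text :=
    text.toList.foldl
      (fun acc char => if char != ' ' then acc ++ color ++ [char] else acc ++ [char]) []
  String.ofList (colored_text ++ pvReset)

-- ===== PORT B =====
-- text.split(' '): keeps empty chunks (Python semantics for an explicit separator)
def pvSplitSp : List Char → List (List Char)
  | [] => [[]]
  | c :: t =>
    if c = ' ' then [] :: pvSplitSp t
    else
      match pvSplitSp t with
      | [] => [[c]]        -- unreachable: pvSplitSp never returns []
      | w :: ws => (c :: w) :: ws

-- ' '.join(chunks)
def pvJoinSp : List (List Char) → List Char
  | [] => []
  | [w] => w
  | w :: ws => w ++ ' ' :: pvJoinSp ws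

-- ''.join(color + c for c in w)
def pvColorChunk (color : List Char) (w : List Char) : List Char :=
  w.flatMap (fun c => color ++ [c])

def apply_ocean_effect_alt (text : String) (line_num : Int) : String :=
  let color := pvOceanColor line_num
  let words := pvSplitSp text.toList
  String.ofList (pvJoinSp (words.map (pvColorChunk color)) ++ pvReset)

-- ===== PRECONDITION & SPEC =====
def Spec_apply_ocean_effect (text : String) (line_num : Int) (out : String) : Prop := out = apply_ocean_effect_alt text line_num
instance (text : String) (line_num : Int) (out : String) : Decidable (Spec_apply_ocean_effect text line_num out) := by unfold Spec_apply_ocean_effect; infer_instance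

-- ===== CLAIM (what is proved, stated in full; the proofs are below) =====
def Claim_equal_apply_ocean_effect : Prop := ∀ (text : String) (line_num : Int), Dom_apply_ocean_effect text line_num → Spec_apply_ocean_effect text line_num (apply_ocean_effect text line_num)

-- ===== LEMMAS AND PROOFS =====
theorem pvSplitSp_cons (l : List Char) : ∃ w ws, pvSplitSp l = w :: ws := by
  cases l with
  | nil => exact ⟨[], [], rfl⟩
  | cons c t =>
    by_cases h : c = ' '
    · exact ⟨[], pvSplitSp t, by simp [pvSplitSp, h]⟩
    · obtain ⟨w, ws, hw⟩ := pvSplitSp_cons t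
      exact ⟨c :: w, ws, by simp [pvSplitSp, h, hw]⟩

theorem pvJoinSp_cons_cons (a b : List Char) (r : List (List Char)) :
    pvJoinSp (a :: b :: r) = a ++ ' ' :: pvJoinSp (b :: r) := rfl

-- B's split/color/join pipeline flattens to the per-character expansion.
theorem pv_join_split (color : List Char) (l : List Char) :
    pvJoinSp ((pvSplitSp l).map (pvColorChunk color))
      = l.flatMap (fun c => if c = ' ' then [c] else color ++ [c]) := by
  induction l with
  | nil => simp [pvSplitSp, pvJoinSp, pvColorChunk]
  | cons c t ih =>
    obtain ⟨w, ws, hw⟩ := pvSplitSp_cons t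
    by_cases h : c = ' '
    · rw [show pvSplitSp (c :: t) = [] :: pvSplitSp t by simp [pvSplitSp, h]]
      rw [List.map_cons, hw, List.map_cons, pvJoinSp_cons_cons, ← List.map_cons, ← hw, ih]
      simp [pvColorChunk, h]
    · rw [show pvSplitSp (c :: t) = (c :: w) :: ws by simp [pvSplitSp, h, hw]]
      rw [List.map_cons]
      have hcol : pvColorChunk color (c :: w) = color ++ [c] ++ pvColorChunk color w := by
        simp [pvColorChunk]
      rw [hcol]
      have hjoin : ∀ (a b : List Char) (rest : List (List Char)),
          pvJoinSp ((a ++ b) :: rest) = a ++ pvJoinSp (b :: rest) := by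
        intro a b rest
        cases rest <;> simp [pvJoinSp]
      rw [show color ++ [c] ++ pvColorChunk color w = (color ++ [c]) ++ pvColorChunk color w from rfl,
          hjoin, ← List.map_cons, ← hw, ih]
      simp [h]

-- A's foldl accumulator equals the per-character expansion.
theorem pv_foldl_flatMap (color : List Char) (l : List Char) (acc : List Char) :
    l.foldl (fun acc char => if char != ' ' then acc ++ color ++ [char] else acc ++ [char]) acc
      = acc ++ l.flatMap (fun c => if c = ' ' then [c] else color ++ [c]) := by
  induction l generalizing acc with
  | nil => simp
  | cons c t ih =>
    rw [List.foldl_cons, List.flatMap_cons]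
    by_cases h : c = ' '
    · rw [if_neg (by simp [h]), if_pos h, ih]; simp
    · rw [if_pos (by simp [h]), if_neg h, ih]; simp

-- ===== VERDICT (by name: the statement is the Claim_ definition above) =====
theorem apply_ocean_effect_spec : Claim_equal_apply_ocean_effect := by
  intro text line_num _
  unfold Spec_apply_ocean_effect apply_ocean_effect apply_ocean_effect_alt
  dsimp only
  rw [pv_foldl_flatMap, pv_join_split]
  simp
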